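-- pv_equiv track=rewrite | github.com/SujeethJinesh/LatentWire | latent_bridge/calibrate.py | _span_kind
-- ===== SOURCE A (Python) =====
-- def _span_kind(text: str) -> str:
--     if not text:
--         return "empty"
--     if text.isspace():
--         return "space"
--     if text.isdigit():
--         return "digit"
--     if text.isalpha():
--         return "alpha"
--     if all(not ch.isalnum() and not ch.isspace() for ch in text):
--         return "punct"
--     return "mixed"
-- ===== SOURCE B (Python) =====
-- def _span_kind(text: str) -> str:
--     if not text:
--         return "empty"
--     all_space = all_digit = all_alpha = all_punct = True
--     for ch in text:
--         all_space = all_space and ch.isspace()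
--         all_digit = all_digit and ch.isdigit()
--         all_alpha = all_alpha and ch.isalpha()
--         all_punct = all_punct and (not ch.isalnum() and not ch.isspace())
--     if all_space:
--         return "space"
--     if all_digit:
--         return "digit"
--     if all_alpha:
--         return "alpha"
--     if all_punct:
--         return "punct"
--     return "mixed"
-- ===== Notes on version B (the rewrite author's own statement) =====
-- stated objective: alternative
-- what changed: B replaces A's four separate whole-string scans (isspace/isdigit/isalpha/all-generator) with a single pass over the characters maintaining four boolean accumulators, branching on them afterwards.
import Mathlib
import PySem

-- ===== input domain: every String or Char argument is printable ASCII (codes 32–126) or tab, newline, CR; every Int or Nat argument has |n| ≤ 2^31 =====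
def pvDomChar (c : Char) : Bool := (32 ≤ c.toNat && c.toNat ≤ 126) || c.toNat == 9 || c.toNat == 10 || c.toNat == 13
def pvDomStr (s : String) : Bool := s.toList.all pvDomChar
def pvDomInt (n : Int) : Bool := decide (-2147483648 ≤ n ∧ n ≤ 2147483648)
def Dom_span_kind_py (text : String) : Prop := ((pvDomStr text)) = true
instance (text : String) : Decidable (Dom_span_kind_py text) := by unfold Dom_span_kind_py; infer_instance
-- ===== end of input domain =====

-- B merges A's four separate whole-string scans into one pass over the characters
-- maintaining four boolean accumulators (objective: alternative decomposition, same cost).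

-- ===== PORT A =====
def span_kind_py (text : String) : String :=
  if text = "" then "empty"
  else if PySem.Str.strIsspace text then "space"
  else if PySem.Str.strIsdigit text then "digit"
  else if PySem.Str.strIsalpha text then "alpha"
  else if text.toList.all (fun ch => !PySem.Chars.isalnum ch && !PySem.Chars.isspace ch) then "punct"
  else "mixed"

-- ===== PORT B =====
def span_kind_py_alt (text : String) : String :=
  if text = "" then "empty"
  else
    let r := text.toList.foldl
      (fun (s : Bool × Bool × Bool × Bool) ch =>
        (s.1 && PySem.Chars.isspace ch,
         s.2.1 && PySem.Chars.isdigit ch,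
         s.2.2.1 && PySem.Chars.isalpha ch,
         s.2.2.2 && (!PySem.Chars.isalnum ch && !PySem.Chars.isspace ch)))
      (true, true, true, true)
    if r.1 then "space"
    else if r.2.1 then "digit"
    else if r.2.2.1 then "alpha"
    else if r.2.2.2 then "punct"
    else "mixed"

-- ===== PRECONDITION & SPEC =====
def Spec_span_kind_py (text : String) (out : String) : Prop := out = span_kind_py_alt text
instance (text : String) (out : String) : Decidable (Spec_span_kind_py text out) := by unfold Spec_span_kind_py; infer_instance

-- ===== CLAIM (what is proved, stated in full; the proofs are below) =====
def Claim_equal_span_kind_py : Prop := ∀ (text : String), Dom_span_kind_py text → Spec_span_kind_py text (span_kind_py text)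

-- ===== LEMMAS AND PROOFS =====

theorem pv_fold_all (l : List Char) (a b c d : Bool) :
    l.foldl
      (fun (s : Bool × Bool × Bool × Bool) ch =>
        (s.1 && PySem.Chars.isspace ch,
         s.2.1 && PySem.Chars.isdigit ch,
         s.2.2.1 && PySem.Chars.isalpha ch,
         s.2.2.2 && (!PySem.Chars.isalnum ch && !PySem.Chars.isspace ch)))
      (a, b, c, d)
    = (a && l.all PySem.Chars.isspace,
       b && l.all PySem.Chars.isdigit,
       c && l.all PySem.Chars.isalpha,
       d && l.all (fun ch => !PySem.Chars.isalnum ch && !PySem.Chars.isspace ch)) := by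
  induction l generalizing a b c d with
  | nil => simp
  | cons x xs ih =>
      simp only [List.foldl_cons, List.all_cons, ih]
      simp [Bool.and_assoc]

-- ===== VERDICT (by name: the statement is the Claim_ definition above) =====
theorem span_kind_py_spec : Claim_equal_span_kind_py := by
  unfold Claim_equal_span_kind_py
  intro text _
  unfold Spec_span_kind_py span_kind_py span_kind_py_alt
  by_cases h : text = ""
  · simp [h]
  · have hl : text.toList ≠ [] := by
      simpa using (String.toList_inj.ne.mpr h : text.toList ≠ "".toList)
    have hne : text.toList.isEmpty = false := by
      simpa [List.isEmpty_iff] using hl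
    simp only [h, pv_fold_all, PySem.Str.strIsspace, PySem.Str.strIsdigit,
      PySem.Str.strIsalpha, PySem.Chars.strIsspace, PySem.Chars.strIsdigit,
      PySem.Chars.strIsalpha]
    simp [hne]
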